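-- pv_equiv track=rewrite | github.com/Dezmoond/parser_zapret | extremism_detection_dataset_number_char/simplify_output.py | get_phrase_strings
-- ===== SOURCE A (Python) =====
-- def clean_phrase(s: str) -> str:
--     """Убираем кавычки по краям и все \" и \" внутри фразы."""
--     s = s.strip()
--     while s.startswith('"') or s.startswith('\\"'):
--         s = s[2:] if s.startswith('\\"') else s[1:]
--     while s.endswith('"') or s.endswith('\\"'):
--         s = s[:-2] if s.endswith('\\"') else s[:-1]
--     s = s.strip()
--     # Убираем все оставшиеся \" и " внутри фразы (для обучения не нужны)
--     return s.replace('\\"', '').replace('"', '').strip()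
--
-- def get_phrase_strings(out_obj):
--     """Из output получаем список строк фраз (уже очищенных)."""
--     phrases = out_obj.get("extremist_phrases") or []
--     result = []
--     for p in phrases:
--         if isinstance(p, dict):
--             result.append(clean_phrase(p.get("phrase", "")))
--         else:
--             result.append(clean_phrase(str(p)))
--     return result
-- ===== SOURCE B (Python) =====
-- def get_phrase_strings(out_obj):
--     """Simpler: the global replaces already delete every '"' and '\\"', so the
--     edge-trimming loops and intermediate strips in clean_phrase are redundant."""
--     phrases = out_obj.get("extremist_phrases") or []
--     return [(p.get("phrase", "") if isinstance(p, dict) else str(p))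
--             .replace('\\"', '').replace('"', '').strip()
--             for p in phrases]
-- ===== Notes on version B (the rewrite author's own statement) =====
-- stated objective: simpler
-- what changed: clean_phrase's two edge-trimming while-loops and the intermediate strips are dropped entirely (the global replaces of '\"' and '"' already delete every character those loops remove), and the per-phrase cleaning is folded into a single list comprehension over one replace-replace-strip pass.
import Mathlib
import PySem

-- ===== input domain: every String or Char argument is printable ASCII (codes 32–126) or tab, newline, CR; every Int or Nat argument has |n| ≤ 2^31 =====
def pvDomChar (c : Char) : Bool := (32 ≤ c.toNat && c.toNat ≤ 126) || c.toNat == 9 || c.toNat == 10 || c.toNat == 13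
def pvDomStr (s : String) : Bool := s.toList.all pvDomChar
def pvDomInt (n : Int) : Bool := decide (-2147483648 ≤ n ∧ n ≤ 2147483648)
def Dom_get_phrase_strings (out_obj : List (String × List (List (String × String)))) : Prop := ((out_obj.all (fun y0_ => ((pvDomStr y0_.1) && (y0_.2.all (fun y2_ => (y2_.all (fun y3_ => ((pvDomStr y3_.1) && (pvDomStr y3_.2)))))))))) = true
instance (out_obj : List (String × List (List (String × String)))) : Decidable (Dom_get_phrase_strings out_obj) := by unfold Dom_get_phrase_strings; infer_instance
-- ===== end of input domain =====

-- B drops clean_phrase's redundant edge-trimming loops and intermediate strips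
-- (the global replaces already delete every character they remove); simpler, same cost.
-- A mutates nothing observable; equivalence is about the return value.

-- ===== PORT A =====
-- clean_phrase, first while loop:
-- while s.startswith('"') or s.startswith('\"'): s = s[2:] if s.startswith('\"') else s[1:]
def cleanLoopL (s : List Char) : List Char :=
  if PySem.Chars.startswith s ['"'] || PySem.Chars.startswith s ['\\', '"'] then
    cleanLoopL (if PySem.Chars.startswith s ['\\', '"']
                then PySem.Chars.slice s (some 2) none
                else PySem.Chars.slice s (some 1) none)
  else s
termination_by s.length
decreasing_by
  simp only [PySem.Chars.slice_eq_listSlice]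
  rw [show (2 : Int) = ((2 : Nat) : Int) by norm_num, show (1 : Int) = ((1 : Nat) : Int) by norm_num]
  rw [PySem.List.slice_from_natCast, PySem.List.slice_from_natCast]
  rename_i h
  rcases Bool.or_eq_true _ _ |>.mp h with h1 | h1 <;>
    · have hne : s ≠ [] := by
        intro hnil; subst hnil; simp [PySem.Chars.startswith, List.isPrefixOf] at h1
      have : 0 < s.length := List.length_pos_iff.mpr hne
      split <;> simp <;> omega

-- clean_phrase, second while loop:
-- while s.endswith('"') or s.endswith('\"'): s = s[:-2] if s.endswith('\"') else s[:-1]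
def cleanLoopR (s : List Char) : List Char :=
  if PySem.Chars.endswith s ['"'] || PySem.Chars.endswith s ['\\', '"'] then
    cleanLoopR (if PySem.Chars.endswith s ['\\', '"']
                then PySem.Chars.slice s none (some (-2))
                else PySem.Chars.slice s none (some (-1)))
  else s
termination_by s.length
decreasing_by
  simp only [PySem.Chars.slice_eq_listSlice]
  rw [PySem.List.slice_to_neg_ofNat s 2 (by omega), PySem.List.slice_to_neg_one]
  rename_i h
  rcases Bool.or_eq_true _ _ |>.mp h with h1 | h1 <;>
    · have hne : s ≠ [] := by
        intro hnil; subst hnil; simp [PySem.Chars.endswith, List.isSuffixOf] at h1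
      have : 0 < s.length := List.length_pos_iff.mpr hne
      split <;> simp [List.length_take] <;> omega

-- def clean_phrase(s): s = s.strip(); <loopL>; <loopR>; s = s.strip();
--   return s.replace('\\"','').replace('"','').strip()
def clean_phrase (s : String) : String :=
  let s1 := PySem.Chars.strip s.toList
  let s2 := cleanLoopL s1
  let s3 := cleanLoopR s2
  let s4 := PySem.Chars.strip s3
  String.ofList (PySem.Chars.strip
    (PySem.Chars.replace (PySem.Chars.replace s4 ['\\', '"'] []) ['"'] []))

-- phrases = out_obj.get("extremist_phrases") or []; loop appending clean_phrase(p.get("phrase",""))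
-- (at this type every p is a dict, so the isinstance(p, dict) branch is always taken)
def get_phrase_strings (out_obj : List (String × List (List (String × String)))) : List String :=
  let phrases : List (List (String × String)) :=
    match (PySem.Dict.mk out_obj).get? "extremist_phrases" with
    | some l => if l.isEmpty then [] else l   -- `or []` truthiness on the looked-up list
    | none => []
  phrases.foldl (fun result p =>
    result ++ [clean_phrase ((PySem.Dict.mk p).getD "phrase" "")]) []

-- ===== PORT B =====
-- (p.get("phrase","") if isinstance(p, dict) else str(p)).replace('\\"','').replace('"','').strip()
-- (at this type every p is a dict)
def clean_alt (s : String) : String :=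
  String.ofList (PySem.Chars.strip
    (PySem.Chars.replace (PySem.Chars.replace s.toList ['\\', '"'] []) ['"'] []))

def get_phrase_strings_alt (out_obj : List (String × List (List (String × String)))) : List String :=
  let phrases : List (List (String × String)) :=
    match (PySem.Dict.mk out_obj).get? "extremist_phrases" with
    | some l => if l.isEmpty then [] else l
    | none => []
  phrases.map (fun p => clean_alt ((PySem.Dict.mk p).getD "phrase" ""))

-- ===== PRECONDITION & SPEC =====
def Spec_get_phrase_strings (out_obj : List (String × List (List (String × String)))) (out : List String) : Prop := out = get_phrase_strings_alt out_obj
instance (out_obj : List (String × List (List (String × String)))) (out : List String) : Decidable (Spec_get_phrase_strings out_obj out) := by unfold Spec_get_phrase_strings; infer_instance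

-- ===== CLAIM (what is proved, stated in full; the proofs are below) =====
def Claim_equal_get_phrase_strings : Prop := ∀ (out_obj : List (String × List (List (String × String)))), Dom_get_phrase_strings out_obj → Spec_get_phrase_strings out_obj (get_phrase_strings out_obj)

-- ===== LEMMAS AND PROOFS =====
theorem go_zero (old new l acc : List Char) :
    PySem.Chars.replace.go old new 0 l acc = acc.reverse ++ l := by
  rw [PySem.Chars.replace.go]

theorem go_nil (old new : List Char) (fuel : Nat) (acc : List Char) :
    PySem.Chars.replace.go old new (fuel+1) [] acc = acc.reverse := by
  rw [PySem.Chars.replace.go]; omega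

theorem go_cons (old new : List Char) (fuel : Nat) (c : Char) (t acc : List Char) :
    PySem.Chars.replace.go old new (fuel+1) (c::t) acc =
      if old.isPrefixOf (c::t)
      then PySem.Chars.replace.go old new fuel (List.drop old.length (c::t)) (new.reverse ++ acc)
      else PySem.Chars.replace.go old new fuel t (c::acc) := by
  rw [PySem.Chars.replace.go]

theorem go_acc (old new : List Char) (hold : old ≠ []) (fuel : Nat) :
    ∀ l acc : List Char, l.length ≤ fuel →
      PySem.Chars.replace.go old new fuel l acc =
        acc.reverse ++ PySem.Chars.replace.go old new l.length l [] := by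
  induction fuel using Nat.strong_induction_on with
  | _ fuel ih =>
  intro l acc h
  match fuel, l with
  | 0, l =>
    have : l = [] := by cases l <;> simp_all
    subst this; simp [go_zero]
  | fuel+1, [] => simp [go_nil, go_zero]
  | fuel+1, c::t =>
    have hlen : 1 ≤ old.length := by cases old <;> simp_all
    simp only [List.length_cons]
    rw [go_cons, go_cons]
    have ht : t.length ≤ fuel := by simp at h; omega
    by_cases hp : old.isPrefixOf (c::t)
    · simp only [hp, if_true]
      have hd' : (List.drop old.length (c::t)).length ≤ t.length := by
        simp only [List.length_drop, List.length_cons]; omega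
      rw [ih fuel (by omega) _ _ (le_trans hd' ht), ih t.length (by omega) _ _ hd']
      simp
    · simp only [hp]
      rw [ih fuel (by omega) _ _ ht, ih t.length (by omega) t [c] (le_refl t.length)]
      simp

theorem replace_eq_go (old new l : List Char) (hold : old ≠ []) :
    PySem.Chars.replace l old new = PySem.Chars.replace.go old new l.length l [] := by
  simp [PySem.Chars.replace, List.isEmpty_iff, hold]

theorem replace_skip (old new : List Char) (hold : old ≠ []) (c : Char) (t : List Char)
    (h : ¬ old.isPrefixOf (c::t)) :
    PySem.Chars.replace (c::t) old new = c :: PySem.Chars.replace t old new := by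
  rw [replace_eq_go _ _ _ hold, replace_eq_go _ _ _ hold]
  simp only [List.length_cons]
  rw [go_cons]
  simp only [h]
  rw [go_acc old new hold _ _ _ (le_refl t.length)]
  simp

theorem replace_match (old new l : List Char) (hold : old ≠ []) (h : old.isPrefixOf l) :
    PySem.Chars.replace l old new = new ++ PySem.Chars.replace (l.drop old.length) old new := by
  cases l with
  | nil => cases old with
    | nil => exact absurd rfl hold
    | cons a b => simp [List.isPrefixOf] at h
  | cons c t =>
    rw [replace_eq_go _ _ _ hold, replace_eq_go _ _ _ hold]
    simp only [List.length_cons]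
    rw [go_cons]
    simp only [h, if_true]
    have hlen : 1 ≤ old.length := by cases old <;> simp_all
    have hd : (List.drop old.length (c::t)).length ≤ t.length := by
      simp only [List.length_drop, List.length_cons]; omega
    rw [go_acc old new hold _ _ _ hd]
    simp

def remBQ (s : List Char) : List Char := PySem.Chars.replace s ['\\', '"'] []
def remQ (s : List Char) : List Char := PySem.Chars.replace s ['"'] []
def remAll (s : List Char) : List Char := remQ (remBQ s)

theorem remBQ_pair (u : List Char) : remBQ ('\\' :: '"' :: u) = remBQ u := by
  unfold remBQ
  rw [replace_match _ _ _ (by simp) (by simp [List.isPrefixOf])]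
  simp

theorem remBQ_cons (c : Char) (u : List Char)
    (h : ¬ (c = '\\' ∧ u.head? = some '"')) : remBQ (c :: u) = c :: remBQ u := by
  unfold remBQ
  rw [replace_skip _ _ (by simp) _ _ ?hh]
  case hh =>
    cases u with
    | nil => simp [List.isPrefixOf]
    | cons b v =>
      simp only [List.isPrefixOf, List.head?] at *
      intro hc
      simp only [Bool.and_eq_true, beq_iff_eq] at hc
      exact h ⟨hc.1.symm, by simp [hc.2.1.symm]⟩

theorem remQ_quote (u : List Char) : remQ ('"' :: u) = remQ u := by
  unfold remQ
  rw [replace_match _ _ _ (by simp) (by simp [List.isPrefixOf])]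
  simp

theorem remQ_cons (c : Char) (u : List Char) (h : c ≠ '"') : remQ (c :: u) = c :: remQ u := by
  unfold remQ
  rw [replace_skip _ _ (by simp) _ _ (by simp [List.isPrefixOf]; exact fun e => h e.symm)]

theorem remAll_nil : remAll [] = [] := by decide

theorem remAll_quote (u : List Char) : remAll ('"' :: u) = remAll u := by
  unfold remAll
  rw [remBQ_cons _ _ (by simp), remQ_quote]

theorem remAll_pair (u : List Char) : remAll ('\\' :: '"' :: u) = remAll u := by
  unfold remAll
  rw [remBQ_pair]

theorem remAll_cons (c : Char) (u : List Char) (hq : c ≠ '"')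
    (h : ¬ (c = '\\' ∧ u.head? = some '"')) : remAll (c :: u) = c :: remAll u := by
  unfold remAll
  rw [remBQ_cons _ _ h, remQ_cons _ _ hq]

theorem remAll_append_one (u : List Char) (c : Char) (hq : c ≠ '"') :
    remAll (u ++ [c]) = remAll u ++ [c] := by
  match u with
  | [] =>
    rw [List.nil_append, remAll_cons c [] hq (by simp), remAll_nil]
    simp
  | '\\' :: '"' :: v =>
    rw [List.cons_append, List.cons_append, remAll_pair, remAll_pair,
      remAll_append_one v c hq]
  | a :: v =>
    by_cases hp : a = '\\' ∧ v.head? = some '"'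
    · obtain ⟨ha, hv⟩ := hp
      cases v with
      | nil => simp at hv
      | cons b w =>
        have hb : b = '"' := by simpa using hv
        subst ha; subst hb
        rw [List.cons_append, List.cons_append, remAll_pair, remAll_pair,
          remAll_append_one w c hq]
    · by_cases ha : a = '"'
      · subst ha
        rw [List.cons_append, remAll_quote, remAll_quote, remAll_append_one v c hq]
      · have h2 : ¬ (a = '\\' ∧ (v ++ [c]).head? = some '"') := by
          cases v with
          | nil => simp [hq]
          | cons b w => simpa using hp
        rw [List.cons_append, remAll_cons a _ ha h2, remAll_cons a _ ha hp,
          remAll_append_one v c hq, List.cons_append]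
termination_by u.length

theorem remAll_append_quote (u : List Char) (h : u.getLast? ≠ some '\\') :
    remAll (u ++ ['"']) = remAll u := by
  match u with
  | [] => rw [List.nil_append, remAll_quote]
  | '\\' :: '"' :: v =>
    have hv : v.getLast? ≠ some '\\' := by
      cases v with
      | nil => simp
      | cons b w => simpa [List.getLast?_cons_cons] using h
    rw [List.cons_append, List.cons_append, remAll_pair, remAll_pair,
      remAll_append_quote v hv]
  | a :: v =>
    by_cases hp : a = '\\' ∧ v.head? = some '"'
    · obtain ⟨ha, hvh⟩ := hp
      cases v with
      | nil => simp at hvh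
      | cons b w =>
        have hb : b = '"' := by simpa using hvh
        subst ha; subst hb
        have hw : w.getLast? ≠ some '\\' := by
          cases w with
          | nil => simp
          | cons b x => simpa [List.getLast?_cons_cons] using h
        rw [List.cons_append, List.cons_append, remAll_pair, remAll_pair,
          remAll_append_quote w hw]
    · have hv : v.getLast? ≠ some '\\' := by
        cases v with
        | nil => simp
        | cons b w => simpa [List.getLast?_cons_cons] using h
      by_cases ha : a = '"'
      · subst ha
        rw [List.cons_append, remAll_quote, remAll_quote, remAll_append_quote v hv]
      · have h2 : ¬ (a = '\\' ∧ (v ++ ['"']).head? = some '"') := by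
          cases v with
          | nil =>
            have : a ≠ '\\' := by simpa using h
            simp [this]
          | cons b w => simpa using hp
        rw [List.cons_append, remAll_cons a _ ha h2, remAll_cons a _ ha hp,
          remAll_append_quote v hv]
termination_by u.length

theorem remAll_append_pair (u : List Char) :
    remAll (u ++ ['\\', '"']) = remAll u := by
  match u with
  | [] => rw [List.nil_append, remAll_pair, remAll_nil]
  | '\\' :: '"' :: v =>
    rw [List.cons_append, List.cons_append, remAll_pair, remAll_pair,
      remAll_append_pair v]
  | a :: v =>
    by_cases hp : a = '\\' ∧ v.head? = some '"'
    · obtain ⟨ha, hvh⟩ := hp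
      cases v with
      | nil => simp at hvh
      | cons b w =>
        have hb : b = '"' := by simpa using hvh
        subst ha; subst hb
        rw [List.cons_append, List.cons_append, remAll_pair, remAll_pair,
          remAll_append_pair w]
    · by_cases ha : a = '"'
      · subst ha
        rw [List.cons_append, remAll_quote, remAll_quote, remAll_append_pair v]
      · have h2 : ¬ (a = '\\' ∧ (v ++ ['\\', '"']).head? = some '"') := by
          cases v with
          | nil => simp
          | cons b w => simpa using hp
        rw [List.cons_append, remAll_cons a _ ha h2, remAll_cons a _ ha hp,
          remAll_append_pair v]
termination_by u.length

theorem remAll_cleanLoopL (s : List Char) : remAll (cleanLoopL s) = remAll s := by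
  rw [cleanLoopL]
  split
  · rename_i h
    by_cases hp : PySem.Chars.startswith s ['\\', '"'] = true
    · obtain ⟨t, rfl⟩ : ∃ t, s = '\\' :: '"' :: t := by
        have := PySem.Chars.startswith_iff s ['\\', '"'] |>.mp hp
        obtain ⟨t, rfl⟩ := this
        exact ⟨t, rfl⟩
      rw [if_pos hp]
      simp only [PySem.Chars.slice_eq_listSlice]
      rw [show (2 : Int) = ((2 : Nat) : Int) by norm_num, PySem.List.slice_from_natCast]
      rw [remAll_cleanLoopL, List.drop_succ_cons, List.drop_succ_cons, List.drop_zero,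
        remAll_pair]
    · have hq : PySem.Chars.startswith s ['"'] = true := by
        rcases Bool.or_eq_true _ _ |>.mp h with h1 | h1
        · exact h1
        · exact absurd h1 hp
      obtain ⟨t, rfl⟩ : ∃ t, s = '"' :: t := by
        have := PySem.Chars.startswith_iff s ['"'] |>.mp hq
        obtain ⟨t, rfl⟩ := this
        exact ⟨t, rfl⟩
      rw [if_neg hp]
      simp only [PySem.Chars.slice_eq_listSlice]
      rw [show (1 : Int) = ((1 : Nat) : Int) by norm_num, PySem.List.slice_from_natCast]
      rw [remAll_cleanLoopL, List.drop_succ_cons, List.drop_zero, remAll_quote]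
  · rfl
termination_by s.length
decreasing_by
  all_goals (subst_vars; simp)

theorem remAll_cleanLoopR (s : List Char) : remAll (cleanLoopR s) = remAll s := by
  rw [cleanLoopR]
  split
  · rename_i h
    by_cases hp : PySem.Chars.endswith s ['\\', '"'] = true
    · obtain ⟨u, rfl⟩ : ∃ u, s = u ++ ['\\', '"'] := by
        have := PySem.Chars.endswith_iff s ['\\', '"'] |>.mp hp
        obtain ⟨u, rfl⟩ := this
        exact ⟨u, rfl⟩
      rw [if_pos hp]
      simp only [PySem.Chars.slice_eq_listSlice]
      rw [PySem.List.slice_to_neg_ofNat _ 2 (by omega)]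
      have htake : List.take ((u ++ ['\\', '"']).length - 2) (u ++ ['\\', '"']) = u := by
        simp [List.take_left']
      rw [htake, remAll_cleanLoopR, remAll_append_pair]
    · have hq : PySem.Chars.endswith s ['"'] = true := by
        rcases Bool.or_eq_true _ _ |>.mp h with h1 | h1
        · exact h1
        · exact absurd h1 hp
      obtain ⟨u, rfl⟩ : ∃ u, s = u ++ ['"'] := by
        have := PySem.Chars.endswith_iff s ['"'] |>.mp hq
        obtain ⟨u, rfl⟩ := this
        exact ⟨u, rfl⟩
      have hlast : u.getLast? ≠ some '\\' := by
        intro hl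
        rw [List.getLast?_eq_some_iff] at hl
        obtain ⟨v, rfl⟩ := hl
        apply hp
        rw [PySem.Chars.endswith_iff]
        exact ⟨v, by simp⟩
      rw [if_neg hp]
      simp only [PySem.Chars.slice_eq_listSlice]
      rw [PySem.List.slice_to_neg_one, List.dropLast_concat]
      rw [remAll_cleanLoopR, remAll_append_quote u hlast]
  · rfl
termination_by s.length
decreasing_by
  all_goals (subst_vars; simp)

theorem isspace_ne_quote {c : Char} (h : PySem.Chars.isspace c = true) : c ≠ '"' := by
  intro e; subst e; simp [PySem.Chars.isspace] at h

theorem isspace_ne_bs {c : Char} (h : PySem.Chars.isspace c = true) : c ≠ '\\' := by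
  intro e; subst e; simp [PySem.Chars.isspace] at h

theorem ws_remAll_left (w x : List Char) (hw : ∀ c ∈ w, PySem.Chars.isspace c = true) :
    remAll (w ++ x) = w ++ remAll x := by
  induction w with
  | nil => simp
  | cons c v ih =>
    have hc := hw c (by simp)
    rw [List.cons_append, remAll_cons c _ (isspace_ne_quote hc)
      (fun hp => isspace_ne_bs hc hp.1), ih (fun d hd => hw d (by simp [hd])),
      List.cons_append]

theorem ws_remAll_right (w : List Char) : ∀ x : List Char,
    (∀ c ∈ w, PySem.Chars.isspace c = true) → remAll (x ++ w) = remAll x ++ w := by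
  induction w with
  | nil => simp
  | cons c v ih =>
    intro x hw
    have hc := hw c (by simp)
    have : x ++ c :: v = (x ++ [c]) ++ v := by simp
    rw [this, ih (x ++ [c]) (fun d hd => hw d (by simp [hd])),
      remAll_append_one x c (isspace_ne_quote hc)]
    simp

theorem dropWhile_ws_append (w x : List Char) (hw : ∀ c ∈ w, PySem.Chars.isspace c = true) :
    List.dropWhile PySem.Chars.isspace (w ++ x) = List.dropWhile PySem.Chars.isspace x := by
  induction w with
  | nil => simp
  | cons c v ih =>
    rw [List.cons_append, List.dropWhile_cons_of_pos (hw c (by simp))]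
    exact ih (fun d hd => hw d (by simp [hd]))

theorem rstrip_append_ws (y w : List Char) (hw : ∀ c ∈ w, PySem.Chars.isspace c = true) :
    PySem.Chars.rstrip (y ++ w) = PySem.Chars.rstrip y := by
  unfold PySem.Chars.rstrip
  rw [List.reverse_append, dropWhile_ws_append w.reverse y.reverse
    (fun c hc => hw c (by simpa using hc))]

theorem strip_ws_append (w x : List Char) (hw : ∀ c ∈ w, PySem.Chars.isspace c = true) :
    PySem.Chars.strip (w ++ x) = PySem.Chars.strip x := by
  unfold PySem.Chars.strip PySem.Chars.lstrip
  rw [dropWhile_ws_append w x hw]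

theorem strip_append_ws (x w : List Char) (hw : ∀ c ∈ w, PySem.Chars.isspace c = true) :
    PySem.Chars.strip (x ++ w) = PySem.Chars.strip x := by
  unfold PySem.Chars.strip PySem.Chars.lstrip
  rw [List.dropWhile_append]
  by_cases he : (List.dropWhile PySem.Chars.isspace x).isEmpty
  · rw [if_pos he]
    have h1 : List.dropWhile PySem.Chars.isspace w = [] := by
      rw [List.dropWhile_eq_nil_iff]
      exact fun c hc => hw c hc
    have h2 : List.dropWhile PySem.Chars.isspace x = [] := by
      simpa [List.isEmpty_iff] using he
    rw [h1, h2]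
  · rw [if_neg he]
    exact rstrip_append_ws _ w hw

theorem stepA (t : List Char) :
    PySem.Chars.strip (remAll (PySem.Chars.lstrip t)) = PySem.Chars.strip (remAll t) := by
  have hws : ∀ c ∈ List.takeWhile PySem.Chars.isspace t, PySem.Chars.isspace c = true :=
    fun c hc => List.mem_takeWhile_imp hc
  conv_rhs => rw [show t = List.takeWhile PySem.Chars.isspace t ++ List.dropWhile PySem.Chars.isspace t from (List.takeWhile_append_dropWhile).symm]
  rw [ws_remAll_left _ _ hws, strip_ws_append _ _ hws]
  rfl

theorem stepB (t : List Char) :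
    PySem.Chars.strip (remAll (PySem.Chars.rstrip t)) = PySem.Chars.strip (remAll t) := by
  have hsplit : (List.dropWhile PySem.Chars.isspace t.reverse).reverse
      ++ (List.takeWhile PySem.Chars.isspace t.reverse).reverse = t := by
    have h := congrArg List.reverse
      (List.takeWhile_append_dropWhile (p := PySem.Chars.isspace) (l := t.reverse))
    rw [List.reverse_append, List.reverse_reverse] at h
    exact h
  have hws : ∀ c ∈ (List.takeWhile PySem.Chars.isspace t.reverse).reverse,
      PySem.Chars.isspace c = true :=
    fun c hc => List.mem_takeWhile_imp (by simpa using hc)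
  conv_rhs => rw [← hsplit]
  rw [ws_remAll_right _ _ hws, strip_append_ws _ _ hws]
  rfl

theorem strip_remAll_strip (t : List Char) :
    PySem.Chars.strip (remAll (PySem.Chars.strip t)) = PySem.Chars.strip (remAll t) := by
  unfold PySem.Chars.strip
  calc PySem.Chars.strip (remAll (PySem.Chars.rstrip (PySem.Chars.lstrip t)))
      = PySem.Chars.strip (remAll (PySem.Chars.lstrip t)) := stepB _
    _ = PySem.Chars.strip (remAll t) := stepA t

theorem clean_phrase_eq_alt (s : String) : clean_phrase s = clean_alt s := by
  show String.ofList (PySem.Chars.strip (remAll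
      (PySem.Chars.strip (cleanLoopR (cleanLoopL (PySem.Chars.strip s.toList))))))
    = String.ofList (PySem.Chars.strip (remAll s.toList))
  rw [strip_remAll_strip, remAll_cleanLoopR, remAll_cleanLoopL, strip_remAll_strip]

-- ===== VERDICT (by name: the statement is the Claim_ definition above) =====
theorem get_phrase_strings_spec : Claim_equal_get_phrase_strings := by
  intro out_obj _
  unfold Spec_get_phrase_strings get_phrase_strings get_phrase_strings_alt
  simp only [PySem.List.foldl_append_singleton_eq_map, List.nil_append]
  exact List.map_congr_left (fun p _ => clean_phrase_eq_alt _)
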